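-- pv_equiv track=rewrite | github.com/skatld123/practice_coding | Programmers/2Stage/[1차]_프렌즈4블록.py | solution
-- ===== SOURCE A (Python) =====
-- def solution(m, n, board):
--     answer = 0
--     new_board = []
--     # 보드 문자열을 리스트로 변환
--     for i in range(m):
--         new_board.append(list(board[i]))
--     cnt = 0
--     while True:
--         # 각 블록을 순회하면서 2x2를 검색
--         block_list = set([])
--         for i in range(m):
--             for j in range(n):
--                 if new_board[i][j] != "*":
--                     blocks = check_2x2(i, j, new_board, m, n)
--                     if blocks:
--                         block_list.update(blocks)
--
--         if len(block_list) == 0: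
--             break
--
--         block_list = sorted(block_list, key=lambda x: (x[1], x[0]))
--         # 블록을 이용해서 땡겨오기,,
--         for bx, by in block_list:
--             for k in range(bx, 0, -1):
--                 new_board[k][by] = new_board[k - 1][by]
--             new_board[0][by] = "*"
--
--         answer += len(block_list)
--     return answer
--
-- def check_2x2(qx, qy, board, m, n):
--     char = board[qx][qy]
--     dx, dy = [0, 1, 1], [1, 0, 1]
--     blocks = [(qx, qy)]
--     for i in range(len(dx)):
--         nx, ny = qx + dx[i], qy + dy[i]
--         if 0 <= nx < m and 0 <= ny < n and board[nx][ny] == char: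
--             blocks.append((nx, ny))
--         else:
--             break
--     if len(blocks) == 4:
--         return blocks
--     else:
--         return None
-- ===== SOURCE B (Python) =====
-- def solution(m, n, board):
--     # Rebuild-by-column collapse instead of per-cell shifting; inline 2x2 detection.
--     grid = [list(board[i][:n]) for i in range(m)]
--     answer = 0
--     while True:
--         removed = set()
--         for i in range(m - 1):
--             for j in range(n - 1):
--                 c = grid[i][j]
--                 if c != '*' and grid[i][j + 1] == c and grid[i + 1][j] == c and grid[i + 1][j + 1] == c:
--                     removed.update([(i, j), (i, j + 1), (i + 1, j), (i + 1, j + 1)])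
--         if not removed:
--             return answer
--         answer += len(removed)
--         cols = []
--         for j in range(n):
--             kept = [grid[i][j] for i in range(m) if (i, j) not in removed]
--             cols.append(['*'] * (m - len(kept)) + kept)
--         grid = [[cols[j][i] for j in range(n)] for i in range(m)]
-- ===== Notes on version B (the rewrite author's own statement) =====
-- stated objective: simpler
-- what changed: Detection becomes an inline four-cell equality check instead of the break-based helper, and the collapse rebuilds each column as its surviving cells under a pad of '*' (no sort of the removed cells, no per-cell shift loops).
import Mathlib
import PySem

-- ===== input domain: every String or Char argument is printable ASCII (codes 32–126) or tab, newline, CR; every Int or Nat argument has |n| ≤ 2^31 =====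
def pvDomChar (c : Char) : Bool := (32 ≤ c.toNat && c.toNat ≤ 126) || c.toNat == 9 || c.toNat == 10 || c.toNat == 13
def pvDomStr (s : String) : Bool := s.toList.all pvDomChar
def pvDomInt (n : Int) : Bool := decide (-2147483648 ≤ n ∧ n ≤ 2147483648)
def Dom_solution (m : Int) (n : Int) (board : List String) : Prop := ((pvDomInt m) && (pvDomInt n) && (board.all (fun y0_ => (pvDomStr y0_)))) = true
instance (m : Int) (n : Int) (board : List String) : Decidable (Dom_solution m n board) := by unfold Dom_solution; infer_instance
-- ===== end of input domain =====

-- B replaces the break-based 2x2 helper by an inline four-cell check and the sorted per-cell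
-- column shifting by a rebuild of each column (kept cells under a pad of '*'), dropping the sort.

-- ===== PORT A =====

-- g[i][j] read with defaults; every use is at an index Pre_ keeps in range, where it is exact
def gridGet (g : List (List Char)) (i j : Int) : Char :=
  PySem.List.pyGetD (PySem.List.pyGetD g i []) j '*'

-- g[i][j] = c assignment; exact for in-range indices (all uses are in range under Pre_)
def gridSet (g : List (List Char)) (i j : Int) (c : Char) : List (List Char) :=
  PySem.List.pySetD g i (PySem.List.pySetD (PySem.List.pyGetD g i []) j c)

-- the for-loop over zip(dx,dy) of check_2x2, with its break (second state argument = blocks)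
def chkLoop (ch : Char) (qx qy m n : Int) (g : List (List Char)) :
    List (Int × Int) → List (Int × Int) → List (Int × Int)
  | [], blocks => blocks
  | d :: rest, blocks =>
    let nx := qx + d.1
    let ny := qy + d.2
    if 0 ≤ nx ∧ nx < m ∧ 0 ≤ ny ∧ ny < n ∧ gridGet g nx ny = ch then
      chkLoop ch qx qy m n g rest (blocks ++ [(nx, ny)])
    else blocks

def check2x2 (qx qy : Int) (g : List (List Char)) (m n : Int) : Option (List (Int × Int)) :=
  let ch := gridGet g qx qy
  let blocks := chkLoop ch qx qy m n g [(0, 1), (1, 0), (1, 1)] [(qx, qy)]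
  if blocks.length = 4 then some blocks else none

def scanA (m n : Int) (g : List (List Char)) : PySem.Set (Int × Int) :=
  (PySem.List.pyRange 0 m 1).foldl (fun s i =>
    (PySem.List.pyRange 0 n 1).foldl (fun s j =>
      if gridGet g i j ≠ '*' then
        match check2x2 i j g m n with
        | some bs => bs.foldl PySem.Set.add s
        | none => s
      else s) s) PySem.Set.empty

-- one removed cell's collapse: pull column c.2 down onto row c.1, star on top
def shiftCell (g : List (List Char)) (c : Int × Int) : List (List Char) :=
  let g1 := (PySem.List.pyRange c.1 0 (-1)).foldl
    (fun g k => gridSet g k c.2 (gridGet g (k - 1) c.2)) g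
  gridSet g1 0 c.2 '*'

def collapseA (g : List (List Char)) (L : List (Int × Int)) : List (List Char) :=
  L.foldl shiftCell g

-- the while True loop; fuel m*n+1 bounds the rounds (each removing round deletes ≥ 1 non-'*'
-- cell of the m×n window, so Python performs at most m*n removing rounds plus the final scan)
def loopA (m n : Int) : Nat → List (List Char) → Int → Int
  | 0, _, acc => acc
  | fuel + 1, g, acc =>
    let s := scanA m n g
    if PySem.Set.len s = 0 then acc
    else loopA m n fuel
      (collapseA g (PySem.List.sorted2 s (fun c => c.2) (fun c => c.1)))
      (acc + (PySem.Set.len s : Int))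

def solution (m : Int) (n : Int) (board : List String) : Int :=
  let g := (PySem.List.pyRange 0 m 1).foldl
    (fun nb i => nb ++ [(PySem.List.pyGetD board i "").toList]) []
  loopA m n (m.toNat * n.toNat + 1) g 0

-- ===== PORT B =====

def scanB (m n : Int) (g : List (List Char)) : PySem.Set (Int × Int) :=
  (PySem.List.pyRange 0 (m - 1) 1).foldl (fun s i =>
    (PySem.List.pyRange 0 (n - 1) 1).foldl (fun s j =>
      let c := gridGet g i j
      if c ≠ '*' ∧ gridGet g i (j + 1) = c ∧ gridGet g (i + 1) j = c ∧
          gridGet g (i + 1) (j + 1) = c then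
        [(i, j), (i, j + 1), (i + 1, j), (i + 1, j + 1)].foldl PySem.Set.add s
      else s) s) PySem.Set.empty

-- column j rebuilt: the kept cells, under (m - #kept) stars
def colB (m : Int) (g : List (List Char)) (s : PySem.Set (Int × Int)) (j : Int) : List Char :=
  let kept := (PySem.List.pyRange 0 m 1).foldl
    (fun ks i => if PySem.Set.contains s (i, j) then ks else ks ++ [gridGet g i j]) []
  List.replicate (m - (kept.length : Int)).toNat '*' ++ kept

def collapseB (m n : Int) (g : List (List Char)) (s : PySem.Set (Int × Int)) :
    List (List Char) :=
  let cols := (PySem.List.pyRange 0 n 1).foldl (fun cs j => cs ++ [colB m g s j]) []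
  (PySem.List.pyRange 0 m 1).map (fun i =>
    (PySem.List.pyRange 0 n 1).map (fun j => gridGet cols j i))

-- the while True loop of Source B, same fuel bound as loopA
def loopB (m n : Int) : Nat → List (List Char) → Int → Int
  | 0, _, acc => acc
  | fuel + 1, g, acc =>
    let s := scanB m n g
    if PySem.Set.len s = 0 then acc
    else loopB m n fuel (collapseB m n g s) (acc + (PySem.Set.len s : Int))

def solution_alt (m : Int) (n : Int) (board : List String) : Int :=
  let g := (PySem.List.pyRange 0 m 1).map
    (fun i => PySem.List.slice (PySem.List.pyGetD board i "").toList none (some n))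
  loopB m n (m.toNat * n.toNat + 1) g 0

-- ===== PRECONDITION & SPEC =====

-- exactly the inputs where A returns: board must have at least m rows and each of the first m
-- rows at least n characters (otherwise A raises IndexError)
def Pre_solution (m : Int) (n : Int) (board : List String) : Prop :=
  m ≤ (board.length : Int) ∧ ∀ s ∈ board.take m.toNat, n ≤ PySem.Str.len s

instance (m : Int) (n : Int) (board : List String) : Decidable (Pre_solution m n board) := by
  unfold Pre_solution; infer_instance

def pvWitness_solution : Int × Int × List String := (2, 2, ["AA", "AB"])

def Spec_solution (m : Int) (n : Int) (board : List String) (out : Int) : Prop :=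
  out = solution_alt m n board

instance (m : Int) (n : Int) (board : List String) (out : Int) :
    Decidable (Spec_solution m n board out) := by unfold Spec_solution; infer_instance

-- ===== CLAIM (what is proved, stated in full; the proofs are below) =====
def Claim_equal_solution : Prop := ∀ (m : Int) (n : Int) (board : List String),
  Dom_solution m n board → Pre_solution m n board →
  Spec_solution m n board (solution m n board)

-- ===== LEMMAS AND PROOFS =====

-- the relation maintained between A's board and B's board through the rounds
def BRel (m n : Int) (gA gB : List (List Char)) : Prop :=
  gB = gA.map (fun r => r.take n.toNat) ∧
  gA.length = m.toNat ∧
  ∀ r ∈ gA, n.toNat ≤ r.length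

-- column j of a board, as a list (one entry per row)
def colOf (g : List (List Char)) (j : Int) : List Char :=
  g.map (fun r => PySem.List.pyGetD r j '*')

-- effect of one removed cell (row t) on its column
def cstep (t : Nat) (c : List Char) : List Char :=
  '*' :: (c.take t ++ c.drop (t + 1))

-- effect of the inner (pull-down) loop of shiftCell on the column, before the '*' write
def pull (t : Nat) (c : List Char) : List Char :=
  c.take 1 ++ (c.take t ++ c.drop (t + 1))

-- the cells (from index k on) kept by predicate p, in order
def keepR (p : Nat → Bool) : Nat → List Char → List Char
  | _, [] => []
  | k, ch :: cs => if p k then ch :: keepR p (k + 1) cs else keepR p (k + 1) cs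

def shapeOf (g : List (List Char)) : List Nat := g.map List.length

-- cell within the m×n window
def inB (m n : Int) (c : Int × Int) : Prop :=
  0 ≤ c.1 ∧ c.1 < m ∧ 0 ≤ c.2 ∧ c.2 < n

lemma pyGetD_nonneg_getD {α : Type} (xs : List α) (i : Int) (d : α) (h : 0 ≤ i) :
    PySem.List.pyGetD xs i d = xs.getD i.toNat d := by
  have hi : i = ((i.toNat : Nat) : Int) := by omega
  rw [hi, PySem.List.pyGetD_natCast, Int.toNat_natCast]

lemma colOf_pyGetD (g : List (List Char)) (j i : Int) :
    PySem.List.pyGetD (colOf g j) i '*' = gridGet g i j := by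
  unfold colOf gridGet
  have h := PySem.List.pyGetD_map (fun r => PySem.List.pyGetD r j '*') g i []
  simpa [PySem.List.pyGetD, PySem.List.pyGet?] using h

lemma length_colOf (g : List (List Char)) (j : Int) : (colOf g j).length = g.length := by
  simp [colOf]

lemma rows_of_shape (g g' : List (List Char)) (h : shapeOf g' = shapeOf g)
    (P : Nat → Prop) (hr : ∀ r ∈ g, P r.length) : ∀ r ∈ g', P r.length := by
  intro r hrm
  have hmem : r.length ∈ shapeOf g' := List.mem_map_of_mem hrm
  rw [h] at hmem
  obtain ⟨r₀, hr₀, he⟩ := List.mem_map.1 hmem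
  rw [← he]; exact hr r₀ hr₀

lemma gridSet_eq (g : List (List Char)) (i j : Int) (c : Char) (hi : 0 ≤ i) (hj : 0 ≤ j) :
    gridSet g i j c = g.set i.toNat ((PySem.List.pyGetD g i []).set j.toNat c) := by
  unfold gridSet
  rw [PySem.List.pySetD_of_nonneg _ _ hi, PySem.List.pySetD_of_nonneg _ _ hj]

lemma shape_gridSet (g : List (List Char)) (i j : Int) (c : Char) (hi : 0 ≤ i) (hj : 0 ≤ j) :
    shapeOf (gridSet g i j c) = shapeOf g := by
  rw [gridSet_eq g i j c hi hj]
  apply List.ext_getElem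
  · simp [shapeOf]
  · intro t h1 h2
    simp only [shapeOf, List.getElem_map, List.getElem_set]
    split
    · next heq =>
      subst heq
      rw [List.length_set]
      have hlen : i.toNat < g.length := by simpa [shapeOf] using h2
      have hlt : i < (g.length : Int) := by omega
      rw [PySem.List.pyGetD_eq_getElem g [] hi hlt]
    · rfl

lemma colOf_gridSet_self (g : List (List Char)) (i j : Int) (c : Char)
    (hi : 0 ≤ i) (hj : 0 ≤ j) (hrow : ∀ r ∈ g, j.toNat < r.length) :
    colOf (gridSet g i j c) j = (colOf g j).set i.toNat c := by
  rw [gridSet_eq g i j c hi hj]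
  apply List.ext_getElem
  · simp [colOf]
  · intro t h1 h2
    have hlen : t < g.length := by simpa [colOf] using h2
    simp only [colOf, List.getElem_map, List.getElem_set]
    split
    · next heq =>
      subst heq
      have hlt : i < (g.length : Int) := by omega
      rw [PySem.List.pyGetD_eq_getElem g [] hi hlt]
      have hjr : j.toNat < (g[i.toNat]).length := hrow _ (List.getElem_mem hlen)
      rw [pyGetD_nonneg_getD _ j '*' hj]
      simp [List.getD, hjr]
    · rfl

lemma colOf_gridSet_ne (g : List (List Char)) (i j j' : Int) (c : Char)
    (hi : 0 ≤ i) (hj : 0 ≤ j) (hj' : 0 ≤ j') (hne : j' ≠ j) :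
    colOf (gridSet g i j c) j' = colOf g j' := by
  rw [gridSet_eq g i j c hi hj]
  apply List.ext_getElem
  · simp [colOf]
  · intro t h1 h2
    have hlen : t < g.length := by simpa [colOf] using h2
    simp only [colOf, List.getElem_map, List.getElem_set]
    split
    · next heq =>
      subst heq
      have hlt : i < (g.length : Int) := by omega
      rw [PySem.List.pyGetD_eq_getElem g [] hi hlt]
      rw [pyGetD_nonneg_getD _ j' '*' hj', pyGetD_nonneg_getD _ j' '*' hj']
      have hnn : j.toNat ≠ j'.toNat := by omega
      simp [List.getD, hnn]
    · rfl

lemma pull_set (cl : List Char) (t : Nat) (h : t + 1 < cl.length) :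
    pull t (cl.set (t + 1) (cl.getD t '*')) = pull (t + 1) cl := by
  have ht : t < cl.length := by omega
  have hgd : cl.getD t '*' = cl[t] := by
    simp [List.getD, List.getElem?_eq_getElem ht]
  unfold pull
  rw [List.take_set_of_le (by omega : 1 ≤ t + 1),
      List.take_set_of_le (by omega : t ≤ t + 1),
      List.drop_eq_getElem_cons (by simpa using h),
      List.drop_set_of_lt (by omega)]
  have htake : List.take (t + 1) cl = List.take t cl ++ [cl[t]] := by
    rw [List.take_add_one]; simp [List.getElem?_eq_getElem ht]
  rw [htake]
  simp only [List.getElem_set, hgd, if_true]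
  simp only [List.append_assoc, List.singleton_append]

lemma innerShift_colOf (by_ : Int) (hb : 0 ≤ by_) :
    ∀ (t : Nat) (g : List (List Char)), (∀ r ∈ g, by_.toNat < r.length) → t < g.length →
    (∀ j, 0 ≤ j →
      colOf ((PySem.List.pyRange (t : Int) 0 (-1)).foldl
        (fun g k => gridSet g k by_ (gridGet g (k - 1) by_)) g) j =
      if by_ = j then pull t (colOf g j) else colOf g j) ∧
    shapeOf ((PySem.List.pyRange (t : Int) 0 (-1)).foldl
        (fun g k => gridSet g k by_ (gridGet g (k - 1) by_)) g) = shapeOf g := by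
  intro t
  induction t with
  | zero =>
    intro g hrow hlen
    rw [PySem.List.pyRange_neg_one_eq_nil (by omega)]
    constructor
    · intro j hj
      split
      · rw [pull]
        simp only [List.take_zero, List.nil_append]
        exact (List.take_append_drop 1 _).symm
      · rfl
    · rfl
  | succ t ih =>
    intro g hrow hlen
    rw [PySem.List.pyRange_neg_one_cons (by omega : (0:Int) < ((t+1 : Nat) : Int))]
    simp only [List.foldl_cons]
    have hcast : ((t + 1 : Nat) : Int) - 1 = (t : Nat) := by push_cast; ring
    set g' := gridSet g ((t+1 : Nat) : Int) by_ (gridGet g (((t+1 : Nat) : Int) - 1) by_) with hg'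
    have hshape' : shapeOf g' = shapeOf g :=
      shape_gridSet g _ by_ _ (by omega) hb
    have hrow' : ∀ r ∈ g', by_.toNat < r.length :=
      rows_of_shape g g' hshape' _ hrow
    have hlen' : t < g'.length := by
      have hlb := congrArg List.length hshape'
      simp only [shapeOf, List.length_map] at hlb
      omega
    obtain ⟨ihc, ihs⟩ := ih g' hrow' hlen'
    have hfold : PySem.List.pyRange ((t+1 : Nat) : Int) 0 (-1) =
        ((t+1 : Nat) : Int) :: PySem.List.pyRange (t : Nat) 0 (-1) := by
      rw [PySem.List.pyRange_neg_one_cons (by omega), hcast]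
    constructor
    · intro j hj
      rw [← hcast] at ihc
      have hcol := ihc j hj
      rw [hcol]
      have hcolby : colOf g' by_ =
          (colOf g by_).set (t+1) ((colOf g by_).getD t '*') := by
        rw [hg', hcast, colOf_gridSet_self g _ by_ _ (by omega) hb hrow]
        have h1 : (((t + 1 : Nat) : Int)).toNat = t + 1 := by omega
        rw [h1, ← colOf_pyGetD g by_ ((t : Nat) : Int), PySem.List.pyGetD_natCast]
      split
      · next hbj =>
        subst hbj
        rw [hcolby, pull_set]
        rw [length_colOf]; omega
      · next hbj =>
        rw [hg', hcast, colOf_gridSet_ne g _ by_ j _ (by omega) hb hj (fun hh => hbj hh.symm)]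
    · rw [← hcast] at ihs
      rw [ihs, hshape']

lemma set_zero_pull (t : Nat) (c : List Char) (h : c ≠ []) :
    (pull t c).set 0 '*' = cstep t c := by
  cases c with
  | nil => exact absurd rfl h
  | cons a cs => simp [pull, cstep]

lemma shiftCell_colOf (g : List (List Char)) (bx by_ n : Int)
    (hbx0 : 0 ≤ bx) (hbx : bx < (g.length : Int)) (hby0 : 0 ≤ by_) (hby : by_ < n)
    (hrow : ∀ r ∈ g, n.toNat ≤ r.length) :
    (∀ j, 0 ≤ j → colOf (shiftCell g (bx, by_)) j =
      if by_ = j then cstep bx.toNat (colOf g j) else colOf g j) ∧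
    shapeOf (shiftCell g (bx, by_)) = shapeOf g := by
  have hnn : 0 < n := by omega
  have hrow' : ∀ r ∈ g, by_.toNat < r.length := by
    intro r hr
    have := hrow r hr
    omega
  have hbxn : bx = ((bx.toNat : Nat) : Int) := by omega
  unfold shiftCell
  simp only
  rw [hbxn]
  obtain ⟨hc, hs⟩ := innerShift_colOf by_ hby0 bx.toNat g hrow' (by omega)
  set g1 := (PySem.List.pyRange ((bx.toNat : Nat) : Int) 0 (-1)).foldl
    (fun g k => gridSet g k by_ (gridGet g (k - 1) by_)) g with hg1
  have hrow1 : ∀ r ∈ g1, by_.toNat < r.length := rows_of_shape g g1 hs _ hrow'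
  have hlen1 : g1.length = g.length := by
    have hlb := congrArg List.length hs
    simpa [shapeOf] using hlb
  constructor
  · intro j hj
    split
    · next hbj =>
      subst hbj
      rw [colOf_gridSet_self g1 0 by_ '*' (by omega) hby0 hrow1]
      have hcb := hc by_ hby0
      rw [if_pos rfl] at hcb
      rw [hcb]
      have hne : colOf g by_ ≠ [] := by
        intro hnil
        have hl : (colOf g by_).length = 0 := by rw [hnil]; rfl
        rw [length_colOf] at hl
        omega
      have htt : (((bx.toNat : Nat) : Int)).toNat = bx.toNat := by omega
      rw [htt]
      exact set_zero_pull bx.toNat (colOf g by_) hne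
    · next hbj =>
      rw [colOf_gridSet_ne g1 0 by_ j '*' (by omega) hby0 hj (fun hh => hbj hh.symm)]
      have hcb := hc j hj
      rw [if_neg hbj] at hcb
      exact hcb
  · rw [shape_gridSet g1 0 by_ '*' (by omega) hby0, hs]

lemma collapseA_colOf (n : Int) :
    ∀ (L : List (Int × Int)) (g : List (List Char)),
    (∀ c ∈ L, 0 ≤ c.1 ∧ c.1 < (g.length : Int) ∧ 0 ≤ c.2 ∧ c.2 < n) →
    (∀ r ∈ g, n.toNat ≤ r.length) →
    (∀ j, 0 ≤ j → colOf (collapseA g L) j =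
      L.foldl (fun cAcc cell => if cell.2 = j then cstep cell.1.toNat cAcc else cAcc)
        (colOf g j)) ∧
    shapeOf (collapseA g L) = shapeOf g := by
  intro L
  induction L with
  | nil =>
    intro g _ _
    exact ⟨fun j _ => rfl, rfl⟩
  | cons cell L ih =>
    intro g hcells hrow
    obtain ⟨bx, by_⟩ := cell
    obtain ⟨h1, h2, h3, h4⟩ := hcells (bx, by_) (List.mem_cons_self)
    obtain ⟨hsc, hss⟩ := shiftCell_colOf g bx by_ n h1 h2 h3 h4 hrow
    have hcoll : collapseA g ((bx, by_) :: L) = collapseA (shiftCell g (bx, by_)) L := rfl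
    have hlen' : (shiftCell g (bx, by_)).length = g.length := by
      have hlb := congrArg List.length hss
      simpa [shapeOf] using hlb
    have hcells' : ∀ c ∈ L, 0 ≤ c.1 ∧ c.1 < ((shiftCell g (bx, by_)).length : Int) ∧
        0 ≤ c.2 ∧ c.2 < n := by
      intro c hc
      have := hcells c (List.mem_cons_of_mem _ hc)
      rw [hlen']
      exact this
    have hrow' : ∀ r ∈ shiftCell g (bx, by_), n.toNat ≤ r.length :=
      rows_of_shape g _ hss _ hrow
    obtain ⟨ihc, ihs⟩ := ih (shiftCell g (bx, by_)) hcells' hrow'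
    constructor
    · intro j hj
      rw [hcoll, ihc j hj, List.foldl_cons]
      congr 1
      exact hsc j hj
    · rw [hcoll, ihs, hss]

lemma keepR_append (p : Nat → Bool) : ∀ (xs ys : List Char) (k : Nat),
    keepR p k (xs ++ ys) = keepR p k xs ++ keepR p (k + xs.length) ys := by
  intro xs
  induction xs with
  | nil => intro ys k; simp [keepR]
  | cons a xs ih =>
    intro ys k
    simp only [List.cons_append, keepR, ih ys (k + 1), List.length_cons]
    have : k + 1 + xs.length = k + (xs.length + 1) := by omega
    rw [this]
    split <;> simp

lemma keepR_all_true (p : Nat → Bool) : ∀ (xs : List Char) (k : Nat),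
    (∀ i, k ≤ i → i < k + xs.length → p i = true) → keepR p k xs = xs := by
  intro xs
  induction xs with
  | nil => intro k _; rfl
  | cons a xs ih =>
    intro k h
    have h0 : p k = true := h k (le_refl k) (by simp)
    simp only [keepR, h0, if_true]
    rw [ih (k + 1) (fun i h1 h2 => h i (by omega) (by simp at h2 ⊢; omega))]

lemma keepR_congr (p q : Nat → Bool) : ∀ (xs : List Char) (k : Nat),
    (∀ i, k ≤ i → i < k + xs.length → p i = q i) → keepR p k xs = keepR q k xs := by
  intro xs
  induction xs with
  | nil => intro k _; rfl
  | cons a xs ih =>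
    intro k h
    have h0 : p k = q k := h k (le_refl k) (by simp)
    simp only [keepR, h0]
    rw [ih (k + 1) (fun i h1 h2 => h i (by omega) (by simp at h2 ⊢; omega))]

lemma keepR_eq (p : Nat → Bool) : ∀ (xs : List Char) (k : Nat),
    keepR p k xs =
      ((List.range xs.length).filter (fun t => p (t + k))).map (fun t => xs.getD t '*') := by
  intro xs
  induction xs with
  | nil => intro k; rfl
  | cons a xs ih =>
    intro k
    have harith : (fun t : Nat => p (t + (k + 1))) = (fun t : Nat => p (t + 1 + k)) := by
      funext t; congr 1; omega
    by_cases hp : p k = true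
    · simp [keepR, ih (k + 1), harith, List.range_succ_eq_map, List.filter_map,
        Function.comp_def, hp]
    · simp [keepR, ih (k + 1), harith, List.range_succ_eq_map, List.filter_map,
        Function.comp_def, hp]

lemma length_cstep (r : Nat) (c : List Char) (h : r < c.length) :
    (cstep r c).length = c.length := by
  simp [cstep]
  omega

lemma keepR_cons_true (p : Nat → Bool) (k : Nat) (a : Char) (xs : List Char)
    (h : p k = true) : keepR p k (a :: xs) = a :: keepR p (k + 1) xs := by
  simp [keepR, h]

lemma keepR_cons_false (p : Nat → Bool) (k : Nat) (a : Char) (xs : List Char)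
    (h : p k = false) : keepR p k (a :: xs) = keepR p (k + 1) xs := by
  simp [keepR, h]

lemma keepR_cstep (r : Nat) (rs : List Nat) (c : List Char)
    (hr : r < c.length) (hgt : ∀ x ∈ rs, r < x) :
    keepR (fun t => !rs.contains t) 0 (cstep r c) =
      '*' :: keepR (fun t => !(r :: rs).contains t) 0 c := by
  have hmem_p : ∀ i : Nat, i ≤ r → (fun t => !rs.contains t) i = true := by
    intro i hi
    simp only [Bool.not_eq_true']
    simp only [List.contains_eq_mem, decide_eq_false_iff_not]
    exact fun h => absurd (hgt i h) (by omega)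
  have hmem_q : ∀ i : Nat, i < r → (fun t => !(r :: rs).contains t) i = true := by
    intro i hi
    simp only [Bool.not_eq_true', List.contains_cons, Bool.or_eq_false_iff]
    refine ⟨by simp; omega, ?_⟩
    simp only [List.contains_eq_mem, decide_eq_false_iff_not]
    exact fun h => absurd (hgt i h) (by omega)
  have htake : (List.take r c).length = r := by simp; omega
  have hL1 : keepR (fun t => !rs.contains t) 1 (List.take r c) = List.take r c :=
    keepR_all_true _ _ _ (fun i h1 h2 => hmem_p i (by rw [htake] at h2; omega))
  have hQ1 : keepR (fun t => !(r :: rs).contains t) 0 (List.take r c) = List.take r c :=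
    keepR_all_true _ _ _ (fun i h1 h2 => hmem_q i (by rw [htake] at h2; omega))
  have hcongr : keepR (fun t => !(r :: rs).contains t) (r + 1) (List.drop (r + 1) c)
      = keepR (fun t => !rs.contains t) (r + 1) (List.drop (r + 1) c) :=
    keepR_congr _ _ _ _ (by
      intro i h1 h2
      simp only [List.contains_cons]
      have hir : (i == r) = false := by simp; omega
      rw [hir]
      simp)
  have hqr : (fun t => !(r :: rs).contains t) r = false := by simp
  have hdrop : List.drop r c = c.getD r '*' :: List.drop (r + 1) c := by
    rw [List.drop_eq_getElem_cons hr]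
    congr 1
    simp [List.getD, List.getElem?_eq_getElem hr]
  have h0 : (fun t => !rs.contains t) 0 = true := hmem_p 0 (by omega)
  rw [show cstep r c = '*' :: (List.take r c ++ List.drop (r + 1) c) from rfl,
      keepR_cons_true _ _ _ _ h0, keepR_append, htake, hL1]
  conv_rhs => rw [← List.take_append_drop r c, keepR_append, htake, hdrop,
    Nat.zero_add, keepR_cons_false _ _ _ _ hqr, hcongr, hQ1]
  simp [Nat.add_comm]

lemma cstep_fold : ∀ (rs : List Nat) (c : List Char),
    rs.Pairwise (· < ·) → (∀ r ∈ rs, r < c.length) →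
    rs.foldl (fun cAcc r => cstep r cAcc) c =
      List.replicate rs.length '*' ++ keepR (fun t => !rs.contains t) 0 c := by
  intro rs
  induction rs with
  | nil =>
    intro c _ _
    simp only [List.foldl_nil, List.length_nil, List.replicate_zero, List.nil_append]
    rw [keepR_all_true _ _ _ (by intro i _ _; simp)]
  | cons r rs ih =>
    intro c hpw hlt
    have hr : r < c.length := hlt r List.mem_cons_self
    have hgt : ∀ x ∈ rs, r < x := fun x hx => (List.pairwise_cons.1 hpw).1 x hx
    rw [List.foldl_cons,
      ih (cstep r c) (List.pairwise_cons.1 hpw).2 (by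
        intro x hx
        rw [length_cstep r c hr]
        exact hlt x (List.mem_cons_of_mem _ hx)),
      keepR_cstep r rs c hr hgt]
    simp [List.replicate_succ']

-- proof-side canonical form of one detection step (= Source B's inline check)
def addFour (s : PySem.Set (Int × Int)) (i j : Int) : PySem.Set (Int × Int) :=
  [(i, j), (i, j + 1), (i + 1, j), (i + 1, j + 1)].foldl PySem.Set.add s

def cscanStep (g : List (List Char)) (s : PySem.Set (Int × Int)) (i j : Int) :
    PySem.Set (Int × Int) :=
  if gridGet g i j ≠ '*' ∧ gridGet g i (j + 1) = gridGet g i j ∧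
      gridGet g (i + 1) j = gridGet g i j ∧ gridGet g (i + 1) (j + 1) = gridGet g i j then
    addFour s i j
  else s

def cscan (m n : Int) (g : List (List Char)) : PySem.Set (Int × Int) :=
  (PySem.List.pyRange 0 (m - 1) 1).foldl (fun s i =>
    (PySem.List.pyRange 0 (n - 1) 1).foldl (fun s j => cscanStep g s i j) s)
    PySem.Set.empty

lemma check2x2_eq (qx qy m n : Int) (g : List (List Char))
    (h0 : 0 ≤ qx) (h1 : qx < m) (h2 : 0 ≤ qy) :
    check2x2 qx qy g m n =
      if qy + 1 < n ∧ gridGet g qx (qy + 1) = gridGet g qx qy ∧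
          qx + 1 < m ∧ gridGet g (qx + 1) qy = gridGet g qx qy ∧
          gridGet g (qx + 1) (qy + 1) = gridGet g qx qy then
        some [(qx, qy), (qx, qy + 1), (qx + 1, qy), (qx + 1, qy + 1)]
      else none := by
  unfold check2x2
  simp only [chkLoop]
  norm_num
  split_ifs <;> simp_all <;> omega

lemma stepA_eq (g : List (List Char)) (m n i j : Int) (s : PySem.Set (Int × Int))
    (h0 : 0 ≤ i) (h1 : i < m) (h2 : 0 ≤ j) :
    (if gridGet g i j ≠ '*' then
      match check2x2 i j g m n with
      | some bs => bs.foldl PySem.Set.add s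
      | none => s
    else s) =
    if gridGet g i j ≠ '*' ∧ j + 1 < n ∧ gridGet g i (j + 1) = gridGet g i j ∧
        i + 1 < m ∧ gridGet g (i + 1) j = gridGet g i j ∧
        gridGet g (i + 1) (j + 1) = gridGet g i j then
      addFour s i j
    else s := by
  rw [check2x2_eq i j m n g h0 h1 h2]
  by_cases hstar : gridGet g i j ≠ '*'
  · rw [if_pos hstar]
    split_ifs with hc1 hc2 hc3
    · rfl
    · exact absurd ⟨hstar, hc1⟩ hc2
    · exact absurd hc3.2 hc1
    · rfl
  · rw [if_neg hstar, if_neg (fun hc => hstar hc.1)]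

lemma innerA_last (g : List (List Char)) (m n i : Int) (s : PySem.Set (Int × Int))
    (h0 : 0 ≤ i) (h1 : i < m) (hlast : m - 1 ≤ i) :
    (PySem.List.pyRange 0 n 1).foldl (fun s j =>
      if gridGet g i j ≠ '*' then
        match check2x2 i j g m n with
        | some bs => bs.foldl PySem.Set.add s
        | none => s
      else s) s = s := by
  rw [PySem.List.foldl_congr_mem _ _ (fun s _ => s) s (by
    intro acc j hj
    obtain ⟨hj0, hjn⟩ := (PySem.List.mem_pyRange_one).1 hj
    rw [stepA_eq g m n i j acc h0 h1 hj0]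
    rw [if_neg]
    rintro ⟨-, -, -, hc, -⟩
    omega)]
  simp

lemma innerA_eq (g : List (List Char)) (m n i : Int) (s : PySem.Set (Int × Int))
    (h0 : 0 ≤ i) (h1 : i < m - 1) :
    (PySem.List.pyRange 0 n 1).foldl (fun s j =>
      if gridGet g i j ≠ '*' then
        match check2x2 i j g m n with
        | some bs => bs.foldl PySem.Set.add s
        | none => s
      else s) s =
    (PySem.List.pyRange 0 (n - 1) 1).foldl (fun s j => cscanStep g s i j) s := by
  by_cases hn : 1 ≤ n
  · rw [PySem.List.pyRange_one_append 0 (n - 1) n (by omega) (by omega),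
      show PySem.List.pyRange (n - 1) n 1 = [n - 1] from by
        rw [PySem.List.pyRange_one_cons (by omega), PySem.List.pyRange_one_eq_nil (by omega)],
      List.foldl_append]
    simp only [List.foldl_cons, List.foldl_nil]
    rw [show ∀ sacc : PySem.Set (Int × Int),
        (if gridGet g i (n - 1) ≠ '*' then
          match check2x2 i (n - 1) g m n with
          | some bs => bs.foldl PySem.Set.add sacc
          | none => sacc
        else sacc) = sacc from by
      intro sacc
      rw [stepA_eq g m n i (n - 1) sacc h0 (by omega) (by omega), if_neg]
      rintro ⟨-, hc, -⟩
      omega]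
    apply PySem.List.foldl_congr_mem
    intro acc j hj
    obtain ⟨hj0, hjn⟩ := (PySem.List.mem_pyRange_one).1 hj
    rw [stepA_eq g m n i j acc h0 (by omega) hj0, cscanStep]
    split_ifs <;> first
      | (simp_all; omega)
      | simp_all
  · rw [show PySem.List.pyRange 0 n 1 = [] from PySem.List.pyRange_one_eq_nil (by omega),
      show PySem.List.pyRange 0 (n - 1) 1 = [] from PySem.List.pyRange_one_eq_nil (by omega)]
    rfl

lemma scanA_eq_cscan (m n : Int) (g : List (List Char)) : scanA m n g = cscan m n g := by
  unfold scanA cscan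
  by_cases hm : 1 ≤ m
  · rw [PySem.List.pyRange_one_append 0 (m - 1) m (by omega) (by omega),
      show PySem.List.pyRange (m - 1) m 1 = [m - 1] from by
        rw [PySem.List.pyRange_one_cons (by omega), PySem.List.pyRange_one_eq_nil (by omega)],
      List.foldl_append]
    simp only [List.foldl_cons, List.foldl_nil]
    rw [innerA_last g m n (m - 1) _ (by omega) (by omega) (by omega)]
    apply PySem.List.foldl_congr_mem
    intro acc i hi
    obtain ⟨hi0, him⟩ := (PySem.List.mem_pyRange_one).1 hi
    exact innerA_eq g m n i acc hi0 him
  · rw [show PySem.List.pyRange 0 m 1 = [] from PySem.List.pyRange_one_eq_nil (by omega),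
      show PySem.List.pyRange 0 (m - 1) 1 = [] from PySem.List.pyRange_one_eq_nil (by omega)]
    rfl

lemma cell_eq (m n : Int) (gA gB : List (List Char)) (hrel : BRel m n gA gB)
    (i j : Int) (hi0 : 0 ≤ i) (hj0 : 0 ≤ j) (hjn : j < n) :
    gridGet gB i j = gridGet gA i j := by
  obtain ⟨hmap, hlen, hrows⟩ := hrel
  unfold gridGet
  rw [hmap]
  have hrow : PySem.List.pyGetD (gA.map (fun r => r.take n.toNat)) i [] =
      (PySem.List.pyGetD gA i []).take n.toNat := by
    have h := PySem.List.pyGetD_map (fun r => r.take n.toNat) gA i []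
    simpa using h
  rw [hrow]
  by_cases hin : i < (gA.length : Int)
  · have hmem : PySem.List.pyGetD gA i [] = gA[i.toNat]'(by omega) := by
      rw [PySem.List.pyGetD_eq_getElem gA [] hi0 hin]
    have hN : n.toNat ≤ (gA[i.toNat]'(by omega)).length :=
      hrows _ (List.getElem_mem (by omega))
    rw [hmem, pyGetD_nonneg_getD _ j '*' hj0, pyGetD_nonneg_getD _ j '*' hj0]
    have hjN : j.toNat < n.toNat := by omega
    simp [List.getD, hjN]
  · have hnone : PySem.List.pyGetD gA i [] = [] := by
      unfold PySem.List.pyGetD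
      rw [show PySem.List.pyGet? gA i = none from by
        rw [PySem.List.pyGet?_eq_none_iff]
        unfold PySem.Raise.InRange
        omega]
      rfl
    rw [hnone]
    simp

lemma scanB_eq_cscan (m n : Int) (gA gB : List (List Char)) (hrel : BRel m n gA gB) :
    scanB m n gB = cscan m n gA := by
  unfold scanB cscan
  apply PySem.List.foldl_congr_mem
  intro acc i hi
  obtain ⟨hi0, him⟩ := (PySem.List.mem_pyRange_one).1 hi
  apply PySem.List.foldl_congr_mem
  intro acc2 j hj
  obtain ⟨hj0, hjn⟩ := (PySem.List.mem_pyRange_one).1 hj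
  show (if gridGet gB i j ≠ '*' ∧ gridGet gB i (j + 1) = gridGet gB i j ∧
      gridGet gB (i + 1) j = gridGet gB i j ∧ gridGet gB (i + 1) (j + 1) = gridGet gB i j then
    [(i, j), (i, j + 1), (i + 1, j), (i + 1, j + 1)].foldl PySem.Set.add acc2
  else acc2) = cscanStep gA acc2 i j
  rw [cell_eq m n gA gB hrel i j hi0 hj0 (by omega),
    cell_eq m n gA gB hrel i (j + 1) hi0 (by omega) (by omega),
    cell_eq m n gA gB hrel (i + 1) j (by omega) hj0 (by omega),
    cell_eq m n gA gB hrel (i + 1) (j + 1) (by omega) (by omega) (by omega)]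
  rfl

lemma mem_addFour (s : PySem.Set (Int × Int)) (i j : Int) (c : Int × Int)
    (hc : c ∈ addFour s i j) :
    c ∈ s ∨ c = (i, j) ∨ c = (i, j + 1) ∨ c = (i + 1, j) ∨ c = (i + 1, j + 1) := by
  unfold addFour at hc
  simp only [List.foldl_cons, List.foldl_nil] at hc
  rcases (PySem.Set.mem_add _ _ _).1 hc with hc | hc
  · rcases (PySem.Set.mem_add _ _ _).1 hc with hc | hc
    · rcases (PySem.Set.mem_add _ _ _).1 hc with hc | hc
      · rcases (PySem.Set.mem_add _ _ _).1 hc with hc | hc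
        · exact Or.inl hc
        · exact Or.inr (Or.inl hc)
      · exact Or.inr (Or.inr (Or.inl hc))
    · exact Or.inr (Or.inr (Or.inr (Or.inl hc)))
  · exact Or.inr (Or.inr (Or.inr (Or.inr hc)))

lemma nodup_addFour (s : PySem.Set (Int × Int)) (i j : Int) (h : s.Nodup) :
    (addFour s i j).Nodup := by
  unfold addFour
  simp only [List.foldl_cons, List.foldl_nil]
  exact PySem.Set.nodup_add _ _ (PySem.Set.nodup_add _ _
    (PySem.Set.nodup_add _ _ (PySem.Set.nodup_add _ _ h)))

lemma cscan_inv (m n : Int) (g : List (List Char)) :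
    (∀ c ∈ cscan m n g, inB m n c) ∧ (cscan m n g).Nodup := by
  unfold cscan
  refine List.foldlRecOn (motive := fun (s : PySem.Set (Int × Int)) => (∀ c ∈ s, inB m n c) ∧ List.Nodup s) _ _ ?_ ?_
  · exact ⟨by intro c hc; simp [PySem.Set.empty] at hc, List.nodup_nil⟩
  · intro b hb i hi
    obtain ⟨hi0, him⟩ := (PySem.List.mem_pyRange_one).1 hi
    refine List.foldlRecOn (motive := fun (s : PySem.Set (Int × Int)) => (∀ c ∈ s, inB m n c) ∧ List.Nodup s) _ _ hb ?_
    intro b2 hb2 j hj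
    obtain ⟨hj0, hjn⟩ := (PySem.List.mem_pyRange_one).1 hj
    unfold cscanStep
    split
    · constructor
      · intro c hc
        rcases mem_addFour b2 i j c hc with h | h | h | h | h
        · exact hb2.1 c h
        all_goals (subst h; exact ⟨by simp; omega, by simp; omega, by simp; omega, by simp; omega⟩)
      · exact nodup_addFour b2 i j hb2.2
    · exact hb2

-- lexicographic (column, row) order used by A's sort
def cellLE (a b : Int × Int) : Prop := a.2 < b.2 ∨ (a.2 = b.2 ∧ a.1 ≤ b.1)

def cellBefore (a b : Int × Int) : Bool :=
  decide (a.2 < b.2) || (!decide (b.2 < a.2) && decide (a.1 < b.1))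

lemma cellLE_trans (a b c : Int × Int) (h1 : cellLE a b) (h2 : cellLE b c) : cellLE a c := by
  unfold cellLE at *
  omega

lemma cellBefore_le (a b : Int × Int) (h : cellBefore a b = true) : cellLE a b := by
  unfold cellBefore at h
  unfold cellLE
  simp at h
  omega

lemma not_cellBefore_le (a b : Int × Int) (h : ¬ cellBefore a b = true) : cellLE b a := by
  unfold cellBefore at h
  unfold cellLE
  simp at h
  omega

lemma insertBy_pairwise_cell (x : Int × Int) : ∀ (ys : List (Int × Int)),
    ys.Pairwise cellLE → (PySem.List.insertBy cellBefore x ys).Pairwise cellLE := by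
  intro ys
  induction ys with
  | nil => intro _; simp [PySem.List.insertBy]
  | cons y ys ih =>
    intro hpw
    rw [PySem.List.insertBy]
    obtain ⟨hy, hys⟩ := List.pairwise_cons.1 hpw
    split
    · next hbef =>
      refine List.pairwise_cons.2 ⟨?_, hpw⟩
      intro w hw
      rcases List.mem_cons.1 hw with hw | hw
      · subst hw; exact cellBefore_le x w hbef
      · exact cellLE_trans x y w (cellBefore_le x y hbef) (hy w hw)
    · next hbef =>
      refine List.pairwise_cons.2 ⟨?_, ih hys⟩
      intro w hw
      rcases (PySem.List.insertBy_mem_iff _ _ _ _).1 hw with hw | hw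
      · subst hw; exact not_cellBefore_le w y hbef
      · exact hy w hw

lemma sorted2_cells_pairwise (S : List (Int × Int)) :
    (PySem.List.sorted2 S (fun c => c.2) (fun c => c.1) false).Pairwise cellLE := by
  show (S.foldl (fun acc x => PySem.List.insertBy cellBefore x acc) []).Pairwise cellLE
  refine List.foldlRecOn _ _ List.Pairwise.nil ?_
  intro b hb x _
  exact insertBy_pairwise_cell x b hb

lemma collapse_rel (m n : Int) (gA gB : List (List Char)) (S : PySem.Set (Int × Int))
    (hrel : BRel m n gA gB) (hS : ∀ c ∈ S, inB m n c) (hnd : S.Nodup) :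
    BRel m n
      (collapseA gA (PySem.List.sorted2 S (fun c => c.2) (fun c => c.1) false))
      (collapseB m n gB S) := by
  obtain ⟨hmap, hlen, hrows⟩ := hrel
  set L := PySem.List.sorted2 S (fun c => c.2) (fun c => c.1) false with hL
  have hperm : L.Perm S := PySem.List.sorted2_perm S _ _ false
  have hmemL : ∀ c : Int × Int, c ∈ L ↔ c ∈ S := fun c => hperm.mem_iff
  have hndL : L.Nodup := (hperm.nodup_iff).2 hnd
  have hcells : ∀ c ∈ L, inB m n c := fun c hc => hS c ((hmemL c).1 hc)
  have hpw : L.Pairwise cellLE := sorted2_cells_pairwise S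
  set gA' := collapseA gA L with hgA'
  have hcellsg : ∀ c ∈ L, 0 ≤ c.1 ∧ c.1 < (gA.length : Int) ∧ 0 ≤ c.2 ∧ c.2 < n := by
    intro c hc
    obtain ⟨a1, a2, a3, a4⟩ := hcells c hc
    refine ⟨a1, ?_, a3, a4⟩
    rw [hlen]
    omega
  obtain ⟨hcol, hshape⟩ := collapseA_colOf n L gA hcellsg hrows
  have hlenA' : gA'.length = gA.length := by
    have hlb := congrArg List.length hshape
    simpa [shapeOf] using hlb
  have hrowsA' : ∀ r ∈ gA', n.toNat ≤ r.length := rows_of_shape gA gA' hshape _ hrows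
  have hcolB : ∀ j : Int, 0 ≤ j → j < n → colB m gB S j = colOf gA' j := by
    intro j hj hjn
    set rs := (L.filter (fun cell => cell.2 == j)).map (fun cell => cell.1.toNat) with hrs
    have hpwrs : rs.Pairwise (· < ·) := by
      rw [hrs, List.pairwise_map]
      have h1 : (L.filter (fun cell => cell.2 == j)).Pairwise (fun a b => cellLE a b ∧ a ≠ b) :=
        (hpw.and hndL).filter _
      refine h1.imp_of_mem ?_
      intro a b ha hb hab
      have haj : a.2 = j := by simpa using (List.mem_filter.1 ha).2
      have hbj : b.2 = j := by simpa using (List.mem_filter.1 hb).2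
      have ha0 : 0 ≤ a.1 := (hcells a (List.mem_filter.1 ha).1).1
      have hb0 : 0 ≤ b.1 := (hcells b (List.mem_filter.1 hb).1).1
      obtain ⟨hle, hne⟩ := hab
      have hlt : a.1 < b.1 := by
        rcases hle with h | ⟨h2, h3⟩
        · omega
        · have hne1 : a.1 ≠ b.1 := by
            intro he
            exact hne (Prod.ext_iff.2 ⟨he, by omega⟩)
          omega
      omega
    have hndrs : rs.Nodup := List.Pairwise.imp (fun h => Nat.ne_of_lt h) hpwrs
    have hmemrs : ∀ t : Nat, t ∈ rs ↔ ((t : Int), j) ∈ S := by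
      intro t
      rw [hrs]
      constructor
      · intro ht
        obtain ⟨cell, hcf, hct⟩ := List.mem_map.1 ht
        obtain ⟨hcL, hcj⟩ := List.mem_filter.1 hcf
        have hcj' : cell.2 = j := by simpa using hcj
        have hc0 : 0 ≤ cell.1 := (hcells cell hcL).1
        have hcel : cell = ((t : Int), j) := by
          rw [Prod.ext_iff]
          exact ⟨by omega, hcj'⟩
        rw [← hcel]
        exact (hmemL cell).1 hcL
      · intro hmem
        exact List.mem_map.2 ⟨((t : Int), j),
          List.mem_filter.2 ⟨(hmemL _).2 hmem, by simp⟩, by simp⟩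
    have hboundrs : ∀ t ∈ rs, t < m.toNat := by
      intro t ht
      obtain ⟨cell, hcf, hct⟩ := List.mem_map.1 (hrs ▸ ht)
      have h := hcells cell (List.mem_filter.1 hcf).1
      unfold inB at h
      omega
    have hcolP : ∀ t : Nat, gridGet gB (t : Int) j = (colOf gA j).getD t '*' := by
      intro t
      rw [cell_eq m n gA gB ⟨hmap, hlen, hrows⟩ (t : Int) j (by omega) hj hjn,
        ← colOf_pyGetD gA j (t : Int), PySem.List.pyGetD_natCast]
    have hkept : ((PySem.List.pyRange 0 m 1).foldl
        (fun ks i => if PySem.Set.contains S (i, j) then ks else ks ++ [gridGet gB i j]) [])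
        = ((List.range m.toNat).filter (fun (t : Nat) => !PySem.Set.contains S ((t : Int), j))).map
            (fun t => (colOf gA j).getD t '*') := by
      rw [PySem.List.foldl_congr_mem _ _
        (fun ks i => if (!PySem.Set.contains S (i, j)) = true then ks ++ [gridGet gB i j]
          else ks) _ (by
          intro acc x hx
          by_cases hc : PySem.Set.contains S (x, j) = true
          · simp only [hc, Bool.not_true]
            rfl
          · simp only [Bool.not_eq_true] at hc
            simp only [hc, Bool.not_false]
            rfl)]
      rw [PySem.List.foldl_append_if, List.nil_append]
      have hfilter : (PySem.List.pyRange 0 m 1).filter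
          (fun i => !PySem.Set.contains S (i, j))
          = ((List.range m.toNat).filter (fun (t : Nat) => !PySem.Set.contains S ((t : Int), j))).map
              (fun (k : Nat) => (k : Int)) := by
        rw [PySem.List.pyRange_zero m, List.filter_map]
        rfl
      rw [hfilter, List.map_map]
      apply List.map_congr_left
      intro t ht
      simp only [Function.comp]
      exact hcolP t
    have hkeep : keepR (fun t => !rs.contains t) 0 (colOf gA j)
        = keepR (fun t => !PySem.Set.contains S ((t : Int), j)) 0 (colOf gA j) := by
      apply keepR_congr
      intro i h1 h2
      have hiM : i < m.toNat := by
        rw [length_colOf, hlen] at h2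
        omega
      congr 1
      rw [Bool.eq_iff_iff, List.contains_eq_mem, decide_eq_true_iff, hmemrs i,
        PySem.Set.contains_iff]
    have hrsperm : rs.Perm ((List.range m.toNat).filter
        (fun (t : Nat) => PySem.Set.contains S ((t : Int), j))) := by
      rw [List.perm_ext_iff_of_nodup hndrs (List.Nodup.filter _ (List.nodup_range))]
      intro t
      rw [hmemrs t, List.mem_filter, List.mem_range, PySem.Set.contains_iff]
      constructor
      · intro h
        refine ⟨?_, h⟩
        have := (hmemrs t).2 h
        exact hboundrs t this
      · exact fun h => h.2
    have hlensum : rs.length +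
        (((List.range m.toNat).filter (fun (t : Nat) => !PySem.Set.contains S ((t : Int), j))).length)
        = m.toNat := by
      rw [hrsperm.length_eq]
      have h := List.length_eq_length_filter_add
        (l := List.range m.toNat) (fun (t : Nat) => PySem.Set.contains S ((t : Int), j))
      simp only [List.length_range] at h
      omega
    calc colB m gB S j
        = List.replicate rs.length '*' ++ keepR (fun t => !rs.contains t) 0 (colOf gA j) := by
          unfold colB
          rw [hkept, hkeep, keepR_eq, length_colOf, hlen]
          simp only [Nat.add_zero, List.length_map]
          congr 2
          omega
      _ = rs.foldl (fun cAcc r => cstep r cAcc) (colOf gA j) :=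
          (cstep_fold rs (colOf gA j) hpwrs (by
            intro r hr
            rw [length_colOf, hlen]
            exact hboundrs r hr)).symm
      _ = (L.filter (fun cell => cell.2 == j)).foldl
            (fun cAcc cell => cstep cell.1.toNat cAcc) (colOf gA j) := by
          rw [hrs, List.foldl_map]
      _ = L.foldl (fun cAcc cell => if cell.2 = j then cstep cell.1.toNat cAcc else cAcc)
            (colOf gA j) := by
          rw [List.foldl_filter]
          apply PySem.List.foldl_congr_mem
          intro acc cell hc
          by_cases hcj : cell.2 = j
          · simp [hcj]
          · simp [hcj]
      _ = colOf gA' j := (hcol j hj).symm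
  -- assemble BRel
  have hcolsList : (PySem.List.pyRange 0 n 1).foldl (fun cs j => cs ++ [colB m gB S j]) []
      = (PySem.List.pyRange 0 n 1).map (colB m gB S) := by
    rw [PySem.List.foldl_append_singleton_eq_map, List.nil_append]
  refine ⟨?_, ?_, ?_⟩
  · unfold collapseB
    rw [hcolsList]
    apply List.ext_getElem
    · simp [PySem.List.length_pyRange_one, hlenA', hlen]
    · intro t h1 h2
      have htM : t < m.toNat := by simpa [PySem.List.length_pyRange_one] using h1
      have htA : t < gA'.length := by omega
      rw [List.getElem_map, List.getElem_map, PySem.List.getElem_pyRange_one]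
      have ht0 : (0 : Int) + (t : Int) = (t : Int) := by omega
      rw [ht0]
      apply List.ext_getElem
      · have hrr := hrowsA' (gA'[t]'htA) (List.getElem_mem htA)
        simp [PySem.List.length_pyRange_one]
        omega
      · intro k k1 k2
        have hkN : k < n.toNat := by simpa [PySem.List.length_pyRange_one] using k1
        rw [List.getElem_map, PySem.List.getElem_pyRange_one]
        have hk0 : (0 : Int) + (k : Int) = (k : Int) := by omega
        rw [hk0, List.getElem_take]
        unfold gridGet
        rw [show PySem.List.pyGetD ((PySem.List.pyRange 0 n 1).map (colB m gB S)) (k : Int) []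
            = colB m gB S (k : Int) from
          PySem.List.pyGetD_map_pyRange_of_nonneg _ n _ [] (by omega) (by omega)]
        rw [hcolB _ (by omega) (by omega)]
        rw [pyGetD_nonneg_getD _ _ _ (by omega : (0 : Int) ≤ (t : Int)), Int.toNat_natCast]
        unfold colOf
        rw [List.getD_eq_getElem?_getD, List.getElem?_map, List.getElem?_eq_getElem htA]
        simp only [Option.map_some, Option.getD_some]
        rw [pyGetD_nonneg_getD _ _ _ (by omega : (0 : Int) ≤ (k : Int)), Int.toNat_natCast]
        have hkr : k < (gA'[t]'htA).length := by
          have := hrowsA' (gA'[t]'htA) (List.getElem_mem htA)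
          omega
        rw [List.getD_eq_getElem?_getD, List.getElem?_eq_getElem hkr]
        simp
  · rw [hlenA', hlen]
  · exact hrowsA'

lemma cscan_trivial (m n : Int) (g : List (List Char)) (h : m ≤ 0 ∨ n ≤ 0) :
    cscan m n g = PySem.Set.empty := by
  unfold cscan
  rcases h with h | h
  · rw [show PySem.List.pyRange 0 (m - 1) 1 = [] from PySem.List.pyRange_one_eq_nil (by omega)]
    rfl
  · simp only [show PySem.List.pyRange 0 (n - 1) 1 = [] from
      PySem.List.pyRange_one_eq_nil (by omega), List.foldl_nil]
    simp

theorem loops_eq (m n : Int) (fuel : Nat) :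
    ∀ gA gB acc, BRel m n gA gB → loopA m n fuel gA acc = loopB m n fuel gB acc := by
  induction fuel with
  | zero => intro gA gB acc _; rfl
  | succ fuel ih =>
    intro gA gB acc hrel
    rw [show loopA m n (fuel + 1) gA acc =
        (if PySem.Set.len (scanA m n gA) = 0 then acc
         else loopA m n fuel
           (collapseA gA (PySem.List.sorted2 (scanA m n gA) (fun c => c.2) (fun c => c.1) false))
           (acc + PySem.Set.len (scanA m n gA))) from rfl,
      show loopB m n (fuel + 1) gB acc =
        (if PySem.Set.len (scanB m n gB) = 0 then acc
         else loopB m n fuel (collapseB m n gB (scanB m n gB))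
           (acc + PySem.Set.len (scanB m n gB))) from rfl]
    have hscan : scanB m n gB = scanA m n gA := by
      rw [scanB_eq_cscan m n gA gB hrel, scanA_eq_cscan]
    rw [hscan]
    split_ifs with hz
    · rfl
    · have hinv := cscan_inv m n gA
      rw [← scanA_eq_cscan] at hinv
      exact ih _ _ _ (collapse_rel m n gA gB (scanA m n gA) hrel hinv.1 hinv.2)

theorem rel_init (m n : Int) (board : List String) (hn : 1 ≤ n)
    (hm : m ≤ (board.length : Int))
    (hlen : ∀ s ∈ board.take m.toNat, n ≤ PySem.Str.len s) :
    BRel m n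
      ((PySem.List.pyRange 0 m 1).foldl
        (fun nb i => nb ++ [(PySem.List.pyGetD board i "").toList]) [])
      ((PySem.List.pyRange 0 m 1).map
        (fun i => PySem.List.slice (PySem.List.pyGetD board i "").toList none (some n))) := by
  rw [PySem.List.foldl_append_singleton_eq_map, List.nil_append]
  have hrowlen : ∀ i : Int, 0 ≤ i → i < m →
      n.toNat ≤ (PySem.List.pyGetD board i "").toList.length := by
    intro i h0 h1
    have hib : i < (board.length : Int) := by omega
    rw [PySem.List.pyGetD_eq_getElem board "" h0 hib]
    have hmem : board[i.toNat]'(by omega) ∈ board.take m.toNat := by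
      have hlt : i.toNat < (board.take m.toNat).length := by
        simp only [List.length_take]
        omega
      have hge : (board.take m.toNat)[i.toNat]'hlt = board[i.toNat]'(by omega) :=
        List.getElem_take
      rw [← hge]
      exact List.getElem_mem hlt
    have := hlen _ hmem
    rw [PySem.Str.len_eq] at this
    omega
  refine ⟨?_, ?_, ?_⟩
  · rw [List.map_map]
    apply List.map_congr_left
    intro i hi
    simp only [Function.comp]
    rw [PySem.List.slice_to _ (by omega : (0 : Int) ≤ n)]
  · simp [PySem.List.length_pyRange_one]
  · intro r hr
    obtain ⟨i, hi, hri⟩ := List.mem_map.1 hr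
    obtain ⟨h0, h1⟩ := (PySem.List.mem_pyRange_one).1 hi
    rw [← hri]
    exact hrowlen i h0 h1

theorem trivial_case (m n : Int) (board : List String) (h : m ≤ 0 ∨ n ≤ 0) :
    solution m n board = solution_alt m n board := by
  unfold solution solution_alt
  rw [show ∀ g : List (List Char), loopA m n (m.toNat * n.toNat + 1) g 0 =
      (if PySem.Set.len (scanA m n g) = 0 then 0
       else loopA m n (m.toNat * n.toNat)
         (collapseA g (PySem.List.sorted2 (scanA m n g) (fun c => c.2) (fun c => c.1) false))
         (0 + PySem.Set.len (scanA m n g))) from fun g => rfl,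
    show ∀ g : List (List Char), loopB m n (m.toNat * n.toNat + 1) g 0 =
      (if PySem.Set.len (scanB m n g) = 0 then 0
       else loopB m n (m.toNat * n.toNat) (collapseB m n g (scanB m n g))
         (0 + PySem.Set.len (scanB m n g))) from fun g => rfl]
  rw [show ∀ g : List (List Char), scanA m n g = PySem.Set.empty from fun g => by
      rw [scanA_eq_cscan, cscan_trivial m n g h],
    show ∀ g : List (List Char), scanB m n g = PySem.Set.empty from fun g => by
      unfold scanB
      rcases h with h | h
      · rw [show PySem.List.pyRange 0 (m - 1) 1 = [] from
          PySem.List.pyRange_one_eq_nil (by omega)]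
        rfl
      · simp only [show PySem.List.pyRange 0 (n - 1) 1 = [] from
          PySem.List.pyRange_one_eq_nil (by omega), List.foldl_nil]
        simp]
  rfl

-- ===== VERDICT (by name: the statement is the Claim_ definition above) =====
theorem solution_spec : Claim_equal_solution := by
  intro m n board _ hpre
  unfold Spec_solution
  by_cases h : m ≤ 0 ∨ n ≤ 0
  · exact trivial_case m n board h
  · push Not at h
    unfold solution solution_alt
    exact loops_eq m n _ _ _ 0 (rel_init m n board h.2 hpre.1 hpre.2)
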